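-- pv_equiv track=rewrite | github.com/tjiangHIT/cuteSV | src/resolution_type.py | polish_indel
-- ===== SOURCE A (Python) =====
-- def polish_indel(candidate_single_SV, max_distance, read_count):
-- 	polish_indel_candidate = list()
-- 	if len(candidate_single_SV) <= 1:
-- 		# return candidate_single_SV
-- 		for temp in candidate_single_SV:
-- 			encode_temp = "%s\t%s\t%d\t%d\t%d\n"%(temp[0], temp[1], temp[2], temp[3], temp[4])
-- 			if temp[4] >= read_count:
-- 				polish_indel_candidate.append(encode_temp)
-- 		return polish_indel_candidate
--
-- 	temp = candidate_single_SV[0]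
-- 	for i in candidate_single_SV[1:]:
-- 		if temp[2] <= i[2] and i[2] <= temp[2]+temp[3] and i[2]-temp[2] <= max_distance:
-- 			# if temp[4] < i[4]:
-- 			# 	temp = i
-- 			new_read_count = temp[4] + i[4]
-- 			new_break_point = int((temp[2]*temp[4]+i[2]*i[4])/new_read_count)
-- 			new_indel_length = int((temp[3]*temp[4]+i[3]*i[4])/new_read_count)
-- 			temp = [i[0], i[1], new_break_point, new_indel_length, new_read_count]
-- 		else:
-- 			encode_temp = "%s\t%s\t%d\t%d\t%d\n"%(temp[0], temp[1], temp[2], temp[3], temp[4])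
-- 			# polish_indel_candidate.append(encode_temp)
-- 			if temp[4] >= read_count:
-- 				polish_indel_candidate.append(encode_temp)
-- 			temp = i
-- 	encode_temp = "%s\t%s\t%d\t%d\t%d\n"%(temp[0], temp[1], temp[2], temp[3], temp[4])
-- 	# polish_indel_candidate.append(encode_temp)
-- 	if temp[4] >= read_count:
-- 		polish_indel_candidate.append(encode_temp)
-- 	return polish_indel_candidate
-- ===== SOURCE B (Python) =====
-- def polish_indel(candidate_single_SV, max_distance, read_count):
-- 	# Staged rewrite: stage 1 partitions the candidates into runs of raw
-- 	# mergeable records, tracking only the running numeric profile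
-- 	# (break point, length, count) needed for the merge test; stage 2
-- 	# reduces each run independently to one record, formats and filters.
-- 	runs = []
-- 	bp = ln = rc = 0
-- 	for c in candidate_single_SV:
-- 		if runs and bp <= c[2] <= bp + ln and c[2] - bp <= max_distance:
-- 			runs[-1].append(c)
-- 			n = rc + c[4]
-- 			bp, ln, rc = int((bp * rc + c[2] * c[4]) / n), int((ln * rc + c[3] * c[4]) / n), n
-- 		else:
-- 			runs.append([c])
-- 			bp, ln, rc = c[2], c[3], c[4]
-- 	out = []
-- 	for seg in runs:
-- 		b, l, r = seg[0][2], seg[0][3], seg[0][4]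
-- 		for c in seg[1:]:
-- 			n = r + c[4]
-- 			b, l, r = int((b * r + c[2] * c[4]) / n), int((l * r + c[3] * c[4]) / n), n
-- 		if r >= read_count:
-- 			out.append("%s\t%s\t%d\t%d\t%d\n" % (seg[-1][0], seg[-1][1], b, l, r))
-- 	return out
-- ===== Notes on version B (the rewrite author's own statement) =====
-- stated objective: alternative
-- what changed: A's single loop interleaves merging, formatting and threshold-filtering on a running merged record (with a separate len<=1 special case); B is staged: stage 1 partitions the input into runs of raw records using only a numeric running profile, stage 2 reduces each run independently to one record and formats/filters it, with no special case.
import Mathlib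
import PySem

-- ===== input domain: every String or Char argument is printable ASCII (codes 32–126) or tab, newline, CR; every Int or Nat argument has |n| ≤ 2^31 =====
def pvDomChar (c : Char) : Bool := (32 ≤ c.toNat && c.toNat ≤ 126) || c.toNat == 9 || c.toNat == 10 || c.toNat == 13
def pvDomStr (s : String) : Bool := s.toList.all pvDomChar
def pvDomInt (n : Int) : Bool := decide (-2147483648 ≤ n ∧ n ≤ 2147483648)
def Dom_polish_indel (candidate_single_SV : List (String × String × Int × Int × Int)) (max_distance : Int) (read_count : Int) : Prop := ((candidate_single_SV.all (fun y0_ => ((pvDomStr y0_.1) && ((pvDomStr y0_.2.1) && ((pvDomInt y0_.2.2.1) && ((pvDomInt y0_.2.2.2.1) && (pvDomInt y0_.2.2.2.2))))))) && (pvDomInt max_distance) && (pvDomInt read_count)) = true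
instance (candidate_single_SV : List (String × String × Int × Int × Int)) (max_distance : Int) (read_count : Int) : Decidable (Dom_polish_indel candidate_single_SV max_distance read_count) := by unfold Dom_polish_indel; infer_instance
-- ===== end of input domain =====

-- B replaces A's single interleaved merge-format-filter loop (with its separate len<=1 branch)
-- by two stages: partition into runs of raw records via a numeric running profile, then reduce
-- each run independently and format/filter it (objective: alternative decomposition, same cost).
-- Shared hand-ported primitive for Python's  int((x)/y)  on ints: CPython's true division is the
-- CORRECTLY ROUNDED binary64 quotient (round-half-to-even), then int() truncates toward zero.
-- Ported by hand step for step (PySem.Int.truncdiv is only exact below 2^53, and the numerators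
-- here reach ~2^63): exact for every int pair whose float quotient does not overflow, in
-- particular for all values this task's domain (|int| ≤ 2^31) can produce.  b = 0 returns 0;
-- Python raises ZeroDivisionError there and Pre_ excludes every input that can reach it.
def pyBitLen (n : Nat) : Nat := if n = 0 then 0 else n.log2 + 1

def pyTrueDivTrunc (a b : Int) : Int :=
  if b = 0 then 0
  else
    let n := a.natAbs
    let d := b.natAbs
    if n = 0 then 0
    else
      let k : Nat := max 2 (64 + pyBitLen d - pyBitLen n)
      let q := (n <<< k) / d
      let r := (n <<< k) % d
      let drop := pyBitLen q - 53
      let m0 := q >>> drop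
      let rest := q % (1 <<< drop)
      let rnd := rest >>> (drop - 1)
      let sticky : Bool := decide (rest % (1 <<< (drop - 1)) ≠ 0) || decide (r ≠ 0)
      let m : Nat := if rnd = 1 ∧ (sticky = true ∨ m0 % 2 = 1) then m0 + 1 else m0
      let t : Nat := if drop ≥ k then m <<< (drop - k) else m >>> (k - drop)
      if (0 ≤ a) = (0 ≤ b) then (t : Int) else -(t : Int)

-- "%s\t%s\t%d\t%d\t%d\n" % temp  (shared: both Pythons use this very format string)
def pyFmt (t : String × String × Int × Int × Int) : String :=
  t.1 ++ "\t" ++ t.2.1 ++ "\t" ++ PySem.Int.toStr t.2.2.1 ++ "\t" ++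
    PySem.Int.toStr t.2.2.2.1 ++ "\t" ++ PySem.Int.toStr t.2.2.2.2 ++ "\n"

-- ===== PORT A =====
def stepA (max_distance read_count : Int)
    (st : (String × String × Int × Int × Int) × List String)
    (i : String × String × Int × Int × Int) :
    (String × String × Int × Int × Int) × List String :=
  let temp := st.1
  if temp.2.2.1 ≤ i.2.2.1 ∧ i.2.2.1 ≤ temp.2.2.1 + temp.2.2.2.1 ∧
      i.2.2.1 - temp.2.2.1 ≤ max_distance then
    let nrc := temp.2.2.2.2 + i.2.2.2.2
    let nbp := pyTrueDivTrunc (temp.2.2.1 * temp.2.2.2.2 + i.2.2.1 * i.2.2.2.2) nrc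
    let nln := pyTrueDivTrunc (temp.2.2.2.1 * temp.2.2.2.2 + i.2.2.2.1 * i.2.2.2.2) nrc
    ((i.1, i.2.1, nbp, nln, nrc), st.2)
  else
    (i, if read_count ≤ temp.2.2.2.2 then st.2 ++ [pyFmt temp] else st.2)

def polish_indel (candidate_single_SV : List (String × String × Int × Int × Int)) (max_distance : Int) (read_count : Int) : List String :=
  if candidate_single_SV.length ≤ 1 then
    candidate_single_SV.foldl
      (fun acc temp => if read_count ≤ temp.2.2.2.2 then acc ++ [pyFmt temp] else acc) []
  else
    match candidate_single_SV with
    | [] => []   -- unreachable: length > 1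
    | t0 :: rest =>
      let st := rest.foldl (stepA max_distance read_count) (t0, [])
      st.2 ++ (if read_count ≤ st.1.2.2.2.2 then [pyFmt st.1] else [])

-- ===== PORT B =====
-- runs[-1].append(c)  (only reached with runs ≠ [])
def appendLast (ls : List (List (String × String × Int × Int × Int)))
    (c : String × String × Int × Int × Int) :
    List (List (String × String × Int × Int × Int)) :=
  ls.dropLast ++ [ls.getLastD [] ++ [c]]

-- stage-1 step: state = (runs, bp, ln, rc)
def stepB (max_distance : Int)
    (st : List (List (String × String × Int × Int × Int)) × Int × Int × Int)
    (c : String × String × Int × Int × Int) :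
    List (List (String × String × Int × Int × Int)) × Int × Int × Int :=
  if st.1 ≠ [] ∧ st.2.1 ≤ c.2.2.1 ∧ c.2.2.1 ≤ st.2.1 + st.2.2.1 ∧
      c.2.2.1 - st.2.1 ≤ max_distance then
    let n := st.2.2.2 + c.2.2.2.2
    (appendLast st.1 c,
     pyTrueDivTrunc (st.2.1 * st.2.2.2 + c.2.2.1 * c.2.2.2.2) n,
     pyTrueDivTrunc (st.2.2.1 * st.2.2.2 + c.2.2.2.1 * c.2.2.2.2) n, n)
  else
    (st.1 ++ [[c]], c.2.2.1, c.2.2.2.1, c.2.2.2.2)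

-- stage-2 inner loop: b,l,r = seg[0][2..4] folded over seg[1:]
-- ([] is unreachable: every run stage 1 builds is nonempty; Python would raise there)
def reduceSeg (seg : List (String × String × Int × Int × Int)) : Int × Int × Int :=
  match seg with
  | [] => (0, 0, 0)
  | s0 :: tl =>
    tl.foldl (fun p c =>
      let n := p.2.2 + c.2.2.2.2
      (pyTrueDivTrunc (p.1 * p.2.2 + c.2.2.1 * c.2.2.2.2) n,
       pyTrueDivTrunc (p.2.1 * p.2.2 + c.2.2.2.1 * c.2.2.2.2) n, n))
      (s0.2.2.1, s0.2.2.2.1, s0.2.2.2.2)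

-- stage-2 body for one run: reduce, then format with seg[-1]'s labels and filter
def emitB (read_count : Int) (seg : List (String × String × Int × Int × Int)) : List String :=
  let p := reduceSeg seg
  if read_count ≤ p.2.2 then
    [pyFmt ((seg.getLastD ("", "", 0, 0, 0)).1, (seg.getLastD ("", "", 0, 0, 0)).2.1,
            p.1, p.2.1, p.2.2)]
  else []

def polish_indel_alt (candidate_single_SV : List (String × String × Int × Int × Int)) (max_distance : Int) (read_count : Int) : List String :=
  let st := candidate_single_SV.foldl (stepB max_distance) ([], 0, 0, 0)
  st.1.foldl (fun out seg => out ++ emitB read_count seg) []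

-- ===== PRECONDITION & SPEC =====
-- Pre_ excludes exactly the inputs on which the merge loop can divide by a zero read-count sum
-- (Python: ZeroDivisionError): every merged denominator is the read-count sum of a contiguous run
-- of length ≥ 2, so requiring all such runs to have nonzero sum excludes every crashing input
-- (conservatively: a zero-sum run whose entries never satisfy the merge test is excluded too).
def Pre_polish_indel (candidate_single_SV : List (String × String × Int × Int × Int)) (max_distance : Int) (read_count : Int) : Prop :=
  ∀ i : Nat, i < candidate_single_SV.length →
    ∀ j : Nat, j < candidate_single_SV.length → i < j →
      (((candidate_single_SV.drop i).take (j - i + 1)).foldl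
        (fun s e => s + e.2.2.2.2) 0) ≠ 0
instance (candidate_single_SV : List (String × String × Int × Int × Int)) (max_distance : Int) (read_count : Int) : Decidable (Pre_polish_indel candidate_single_SV max_distance read_count) := by unfold Pre_polish_indel; infer_instance

def pvWitness_polish_indel : (List (String × String × Int × Int × Int)) × Int × Int :=
  ([("chr1", "INS", 3, 4, 2), ("chr1", "INS", 5, 4, 3), ("chr1", "INS", 100, 1, 1)], 10, 2)

def Spec_polish_indel (candidate_single_SV : List (String × String × Int × Int × Int)) (max_distance : Int) (read_count : Int) (out : List String) : Prop := out = polish_indel_alt candidate_single_SV max_distance read_count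
instance (candidate_single_SV : List (String × String × Int × Int × Int)) (max_distance : Int) (read_count : Int) (out : List String) : Decidable (Spec_polish_indel candidate_single_SV max_distance read_count out) := by unfold Spec_polish_indel; infer_instance

-- ===== CLAIM (what is proved, stated in full; the proofs are below) =====
def Claim_equal_polish_indel : Prop := ∀ (candidate_single_SV : List (String × String × Int × Int × Int)) (max_distance : Int) (read_count : Int), Dom_polish_indel candidate_single_SV max_distance read_count → Pre_polish_indel candidate_single_SV max_distance read_count → Spec_polish_indel candidate_single_SV max_distance read_count (polish_indel candidate_single_SV max_distance read_count)

-- ===== LEMMAS AND PROOFS =====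

-- A's merged record for one merge step (proof helper)
def mergeR (t i : String × String × Int × Int × Int) : String × String × Int × Int × Int :=
  (i.1, i.2.1,
   pyTrueDivTrunc (t.2.2.1 * t.2.2.2.2 + i.2.2.1 * i.2.2.2.2) (t.2.2.2.2 + i.2.2.2.2),
   pyTrueDivTrunc (t.2.2.2.1 * t.2.2.2.2 + i.2.2.2.1 * i.2.2.2.2) (t.2.2.2.2 + i.2.2.2.2),
   t.2.2.2.2 + i.2.2.2.2)

-- A's running temp for the run s0 :: tl (proof helper)
def segRec (s0 : String × String × Int × Int × Int)
    (tl : List (String × String × Int × Int × Int)) :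
    String × String × Int × Int × Int := tl.foldl mergeR s0

theorem reduceSeg_eq_segRec (tl : List (String × String × Int × Int × Int))
    (s0 : String × String × Int × Int × Int) :
    reduceSeg (s0 :: tl) =
      ((segRec s0 tl).2.2.1, (segRec s0 tl).2.2.2.1, (segRec s0 tl).2.2.2.2) := by
  induction tl generalizing s0 with
  | nil => simp [reduceSeg, segRec]
  | cons c tl ih =>
    have := ih (mergeR s0 c)
    simp only [reduceSeg, List.foldl_cons, segRec] at this ⊢
    convert this using 2

theorem segRec_labels (tl : List (String × String × Int × Int × Int))
    (s0 : String × String × Int × Int × Int) :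
    (segRec s0 tl).1 = (tl.getLastD s0).1 ∧ (segRec s0 tl).2.1 = (tl.getLastD s0).2.1 := by
  induction tl generalizing s0 with
  | nil => simp [segRec]
  | cons c tl ih =>
    have h := ih (mergeR s0 c)
    simp only [segRec, List.foldl_cons] at h ⊢
    rcases tl with _ | ⟨x, xs⟩
    · simpa [mergeR] using h
    · simpa using h

theorem emitB_eq (read_count : Int) (s0 : String × String × Int × Int × Int)
    (tl : List (String × String × Int × Int × Int)) :
    emitB read_count (s0 :: tl) =
      (if read_count ≤ (segRec s0 tl).2.2.2.2 then [pyFmt (segRec s0 tl)] else []) := by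
  have hl := segRec_labels tl s0
  have hr := reduceSeg_eq_segRec tl s0
  simp only [emitB, hr, List.getLastD_cons]
  split_ifs
  · simp [pyFmt, hl.1, hl.2]
  · rfl

theorem appendLast_concat (done : List (List (String × String × Int × Int × Int)))
    (run : List (String × String × Int × Int × Int))
    (c : String × String × Int × Int × Int) :
    appendLast (done ++ [run]) c = done ++ [run ++ [c]] := by
  simp [appendLast]

-- Core invariant: A's loop from temp = segRec s0 tl and the already-emitted lines of the
-- completed runs `done` computes the same output as B's stage 2 over B's stage-1 result.
theorem loop_eq (max_distance read_count : Int)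
    (l : List (String × String × Int × Int × Int))
    (done : List (List (String × String × Int × Int × Int)))
    (s0 : String × String × Int × Int × Int)
    (tl : List (String × String × Int × Int × Int)) :
    (let st := l.foldl (stepA max_distance read_count)
        (segRec s0 tl, done.flatMap (emitB read_count));
     st.2 ++ (if read_count ≤ st.1.2.2.2.2 then [pyFmt st.1] else []))
    = ((l.foldl (stepB max_distance) (done ++ [s0 :: tl],
         (segRec s0 tl).2.2.1, (segRec s0 tl).2.2.2.1, (segRec s0 tl).2.2.2.2)).1).flatMap
        (emitB read_count) := by
  induction l generalizing done s0 tl with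
  | nil =>
    simp only [List.foldl_nil, List.flatMap_append, List.flatMap_cons, List.flatMap_nil,
      List.append_nil, emitB_eq]
  | cons i l ih =>
    simp only [List.foldl_cons]
    by_cases h : (segRec s0 tl).2.2.1 ≤ i.2.2.1 ∧
        i.2.2.1 ≤ (segRec s0 tl).2.2.1 + (segRec s0 tl).2.2.2.1 ∧
        i.2.2.1 - (segRec s0 tl).2.2.1 ≤ max_distance
    · have hA : stepA max_distance read_count
          (segRec s0 tl, done.flatMap (emitB read_count)) i
          = (mergeR (segRec s0 tl) i, done.flatMap (emitB read_count)) := by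
        simp [stepA, mergeR, h]
      have hseg : mergeR (segRec s0 tl) i = segRec s0 (tl ++ [i]) := by
        simp [segRec, List.foldl_append]
      have hB : stepB max_distance (done ++ [s0 :: tl],
          (segRec s0 tl).2.2.1, (segRec s0 tl).2.2.2.1, (segRec s0 tl).2.2.2.2) i
          = (done ++ [s0 :: (tl ++ [i])],
             (segRec s0 (tl ++ [i])).2.2.1, (segRec s0 (tl ++ [i])).2.2.2.1,
             (segRec s0 (tl ++ [i])).2.2.2.2) := by
        simp only [stepB]
        rw [if_pos (by exact ⟨by simp, h⟩)]
        rw [show (done ++ [s0 :: tl] : List _) = done ++ [(s0 :: tl : List _)] from rfl,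
          appendLast_concat]
        simp [← hseg, mergeR]
      rw [hA, hseg, hB]
      exact ih done s0 (tl ++ [i])
    · have hA : stepA max_distance read_count
          (segRec s0 tl, done.flatMap (emitB read_count)) i
          = (i, (done ++ [s0 :: tl]).flatMap (emitB read_count)) := by
        simp only [stepA]
        rw [if_neg h]
        simp [List.flatMap_append, emitB_eq]
        split_ifs <;> simp
      have hB : stepB max_distance (done ++ [s0 :: tl],
          (segRec s0 tl).2.2.1, (segRec s0 tl).2.2.2.1, (segRec s0 tl).2.2.2.2) i
          = ((done ++ [s0 :: tl]) ++ [[i]], i.2.2.1, i.2.2.2.1, i.2.2.2.2) := by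
        simp only [stepB]
        rw [if_neg (by intro hc; exact h hc.2)]
      rw [hA, hB]
      have := ih (done ++ [s0 :: tl]) i []
      simpa [segRec] using this

-- ===== VERDICT (by name: the statement is the Claim_ definition above) =====
theorem polish_indel_spec : Claim_equal_polish_indel := by
  intro cs max_distance read_count _ _
  unfold Spec_polish_indel polish_indel polish_indel_alt
  match cs with
  | [] => simp
  | [x] =>
    rw [if_pos (by simp)]
    simp only [List.foldl_cons, List.foldl_nil]
    rw [show stepB max_distance ([], 0, 0, 0) x = ([[x]], x.2.2.1, x.2.2.2.1, x.2.2.2.2)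
      from by simp [stepB]]
    by_cases h : read_count ≤ x.2.2.2.2 <;> simp [emitB, reduceSeg, pyFmt, h]
  | t0 :: t1 :: rest =>
    have hlen : ¬ ((t0 :: t1 :: rest).length ≤ 1) := by simp
    have key := loop_eq max_distance read_count (t1 :: rest) [] t0 []
    simp only [segRec, List.foldl_nil, List.flatMap_nil, List.nil_append] at key
    have h0 : (t0 :: t1 :: rest).foldl (stepB max_distance) ([], 0, 0, 0)
        = (t1 :: rest).foldl (stepB max_distance) ([[t0]], t0.2.2.1, t0.2.2.2.1, t0.2.2.2.2) := by
      rw [List.foldl_cons,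
        show stepB max_distance ([], 0, 0, 0) t0 = ([[t0]], t0.2.2.1, t0.2.2.2.1, t0.2.2.2.2)
        from by simp [stepB]]
    rw [if_neg hlen]
    show ((t1 :: rest).foldl (stepA max_distance read_count) (t0, [])).2 ++
        (if read_count ≤ ((t1 :: rest).foldl (stepA max_distance read_count) (t0, [])).1.2.2.2.2
         then [pyFmt ((t1 :: rest).foldl (stepA max_distance read_count) (t0, [])).1] else [])
      = ((t0 :: t1 :: rest).foldl (stepB max_distance) ([], 0, 0, 0)).1.foldl
          (fun out seg => out ++ emitB read_count seg) []
    rw [h0, PySem.List.foldl_append_eq_flatMap, List.nil_append]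
    exact key
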